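-- pv_equiv track=rewrite | github.com/jyjang1222/coding_test | programmers/lv2/_11_유형_전용알고리즘/_큰수만들기.py | getCombi
-- ===== SOURCE A (Python) =====
-- def getCombi(num , k):
--
--     di = {"arr" : "" ,  "d" : 0}
--     stack = [di]
--     combiList = []
--     size = len(num)
--     while len(stack) > 0:
--         pop = stack.pop()
--         arr = pop["arr"]
--         d = pop["d"]
--
--         if len(arr) == size - k:
--             combiList.append(arr)
--             continue
--         if d == size:
--             continue
--         temparr = arr
--         temparr += num[d]
--         di = {"arr" : temparr , "d" : d + 1}
--         stack.append(di)
--         temparr =arr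
--         di = {"arr" : temparr , "d" : d + 1}
--         stack.append(di)
--         pass
--     return combiList
--     pass
-- ===== SOURCE B (Python) =====
-- def getCombi(num, k):
--     size = len(num)
--     target = size - k
--     combiList = []
--
--     def rec(arr, d):
--         if len(arr) == target:
--             combiList.append(arr)
--             return
--         if d >= size:
--             return
--         rec(arr, d + 1)            # exclude num[d]
--         rec(arr + num[d], d + 1)   # include num[d]
--
--     rec('', 0)
--     return combiList
-- ===== Notes on version B (the rewrite author's own statement) =====
-- stated objective: simpler
-- what changed: A's explicit stack of dicts driving a while-loop DFS is replaced by a direct recursive helper rec(arr, d) that appends completed subsequences and recurses exclude-first then include, producing the same list in the same order.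
import Mathlib
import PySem

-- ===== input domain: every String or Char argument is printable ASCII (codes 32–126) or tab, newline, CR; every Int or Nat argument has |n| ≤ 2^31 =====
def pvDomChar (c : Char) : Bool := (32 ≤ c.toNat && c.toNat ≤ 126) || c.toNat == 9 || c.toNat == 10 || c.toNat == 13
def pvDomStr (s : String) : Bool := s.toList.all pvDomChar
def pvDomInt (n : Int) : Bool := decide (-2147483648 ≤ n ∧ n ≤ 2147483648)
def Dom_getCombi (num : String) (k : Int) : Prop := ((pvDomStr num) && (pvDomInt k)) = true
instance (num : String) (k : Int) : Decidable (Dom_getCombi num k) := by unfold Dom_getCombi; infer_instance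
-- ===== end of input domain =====

-- B replaces A's explicit dict-stack DFS by a direct exclude-first recursion (simpler decomposition, same order).

-- ===== PORT A =====
-- A's stack of dicts {"arr","d"} is modelled as a List (String × Nat) with the head as the
-- Python list's END (push = cons, pop = head), so Python's two appends become two conses in
-- reverse order.  d starts at 0 and is only incremented, so it is kept as a Nat; the guard
-- `d == size` is written `size ≤ d` purely so the recursion is total on unreachable states
-- (on every reachable state d ≤ size, where the two guards coincide).
def getCombiLoop (numL : List Char) (target : Int) (stack : List (String × Nat)) (combi : List String) : List String :=
  match stack with
  | [] => combi
  | (arr, d) :: rest =>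
    if (arr.length : Int) = target then
      getCombiLoop numL target rest (combi ++ [arr])
    else if numL.length ≤ d then
      getCombiLoop numL target rest combi
    else
      -- Python pushes (arr+num[d], d+1) then (arr, d+1); the second push is the new top.
      getCombiLoop numL target ((arr, d + 1) :: (arr.push (numL.getD d ' '), d + 1) :: rest) combi
termination_by (stack.map (fun p => 3 ^ (numL.length + 1 - p.2))).sum
decreasing_by
  all_goals simp only [List.map_cons, List.sum_cons]
  · have h3 : (0:ℕ) < 3 ^ (numL.length + 1 - d) := by positivity
    omega
  · have h3 : (0:ℕ) < 3 ^ (numL.length + 1 - d) := by positivity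
    omega
  · have h1 : numL.length + 1 - (d + 1) = numL.length - d := by omega
    have h2 : numL.length + 1 - d = (numL.length - d) + 1 := by omega
    rw [h1, h2]
    have h3 : (0:ℕ) < 3 ^ (numL.length - d) := by positivity
    ring_nf
    omega

def getCombi (num : String) (k : Int) : List String :=
  getCombiLoop num.toList ((num.toList.length : Int) - k) [("", 0)] []

-- ===== PORT B =====
-- rec(arr, d) of Source B: length check, then the d ≥ size cutoff, then exclude-first recursion.
def getCombiRec (numL : List Char) (target : Int) (arr : String) (d : Nat) : List String :=
  if (arr.length : Int) = target then [arr]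
  else if numL.length ≤ d then []
  else getCombiRec numL target arr (d + 1) ++
       getCombiRec numL target (arr.push (numL.getD d ' ')) (d + 1)
termination_by numL.length - d

def getCombi_alt (num : String) (k : Int) : List String :=
  getCombiRec num.toList ((num.toList.length : Int) - k) "" 0

-- ===== PRECONDITION & SPEC =====
def Spec_getCombi (num : String) (k : Int) (out : List String) : Prop := out = getCombi_alt num k
instance (num : String) (k : Int) (out : List String) : Decidable (Spec_getCombi num k out) := by unfold Spec_getCombi; infer_instance

-- ===== CLAIM (what is proved, stated in full; the proofs are below) =====
def Claim_equal_getCombi : Prop := ∀ (num : String) (k : Int), Dom_getCombi num k → Spec_getCombi num k (getCombi num k)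

-- ===== LEMMAS AND PROOFS =====

-- Unfolding lemmas for getCombiRec, one per branch of Source B's rec.
theorem getCombiRec_app (numL : List Char) (target : Int) (arr : String) (d : Nat)
    (h : (arr.length : Int) = target) : getCombiRec numL target arr d = [arr] := by
  rw [getCombiRec.eq_def]; simp [h]

theorem getCombiRec_cut (numL : List Char) (target : Int) (arr : String) (d : Nat)
    (h1 : ¬ (arr.length : Int) = target) (h2 : numL.length ≤ d) :
    getCombiRec numL target arr d = [] := by
  rw [getCombiRec.eq_def]; simp [h1, h2]

theorem getCombiRec_step (numL : List Char) (target : Int) (arr : String) (d : Nat)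
    (h1 : ¬ (arr.length : Int) = target) (h2 : ¬ numL.length ≤ d) :
    getCombiRec numL target arr d
      = getCombiRec numL target arr (d + 1) ++
        getCombiRec numL target (arr.push (numL.getD d ' ')) (d + 1) := by
  rw [getCombiRec.eq_def]; simp [h1, h2]

-- Loop invariant: the stack loop produces the accumulator followed by the recursive
-- enumeration of each pending stack frame, top first.
theorem getCombiLoop_eq (numL : List Char) (target : Int) (stack : List (String × Nat)) (combi : List String) :
    getCombiLoop numL target stack combi
      = combi ++ (stack.map (fun p => getCombiRec numL target p.1 p.2)).flatten := by
  fun_induction getCombiLoop numL target stack combi with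
  | case1 => simp
  | case2 combi arr d stack h ih =>
    rw [ih, List.map_cons, List.flatten_cons, getCombiRec_app numL target arr d h]
    simp
  | case3 combi arr d stack h1 h2 ih =>
    rw [ih, List.map_cons, List.flatten_cons, getCombiRec_cut numL target arr d h1 h2]
    simp
  | case4 combi arr d stack h1 h2 ih =>
    rw [ih]
    conv_rhs => rw [List.map_cons, List.flatten_cons, getCombiRec_step numL target arr d h1 h2]
    simp

-- ===== VERDICT (by name: the statement is the Claim_ definition above) =====
theorem getCombi_spec : Claim_equal_getCombi := by
  intro num k _
  unfold Spec_getCombi getCombi getCombi_alt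
  rw [getCombiLoop_eq]
  simp
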